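-- pv_equiv track=rewrite | github.com/prince0-7/lifelink-v1 | backend/services/relationship_service.py | _detect_theme
-- ===== SOURCE A (Python) =====
-- from typing import List, Dict, Tuple, Optional
--
-- def _detect_theme(keywords: List[str], dominant_mood: str) -> str:
--     """Detect theme based on keywords and mood"""
--     # Simple theme detection based on keywords
--     work_keywords = {'work', 'office', 'meeting', 'project', 'colleague', 'boss', 'job'}
--     travel_keywords = {'travel', 'trip', 'vacation', 'flight', 'hotel', 'visit', 'tourist'}
--     family_keywords = {'family', 'mom', 'dad', 'sister', 'brother', 'parent', 'child'}
--     friends_keywords = {'friend', 'buddy', 'pal', 'hangout', 'party', 'fun'}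
--     health_keywords = {'health', 'exercise', 'gym', 'doctor', 'medical', 'fitness', 'wellness'}
--
--     keyword_set = set(k.lower() for k in keywords)
--
--     if keyword_set.intersection(work_keywords):
--         return "Work"
--     elif keyword_set.intersection(travel_keywords):
--         return "Travel"
--     elif keyword_set.intersection(family_keywords):
--         return "Family"
--     elif keyword_set.intersection(friends_keywords):
--         return "Friends"
--     elif keyword_set.intersection(health_keywords):
--         return "Health"
--     elif dominant_mood == "Happy":
--         return "Joy"
--     elif dominant_mood == "Sad":
--         return "Reflection"
--     else:
--         return "Life"
-- ===== SOURCE B (Python) =====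
-- _THEME_OF = {
--     kw: theme
--     for theme, kws in [
--         ("Work", ("work", "office", "meeting", "project", "colleague", "boss", "job")),
--         ("Travel", ("travel", "trip", "vacation", "flight", "hotel", "visit", "tourist")),
--         ("Family", ("family", "mom", "dad", "sister", "brother", "parent", "child")),
--         ("Friends", ("friend", "buddy", "pal", "hangout", "party", "fun")),
--         ("Health", ("health", "exercise", "gym", "doctor", "medical", "fitness", "wellness")),
--     ]
--     for kw in kws
-- }
--
-- _PRIORITY = ["Work", "Travel", "Family", "Friends", "Health"]
--
-- _MOOD_FALLBACK = {"Happy": "Joy", "Sad": "Reflection"}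
--
--
-- def _detect_theme(keywords, dominant_mood):
--     """Detect theme based on keywords and mood"""
--     hit = set()
--     for k in keywords:
--         theme = _THEME_OF.get(k.lower())
--         if theme is not None:
--             hit.add(theme)
--     for theme in _PRIORITY:
--         if theme in hit:
--             return theme
--     return _MOOD_FALLBACK.get(dominant_mood, "Life")
-- ===== Notes on version B (the rewrite author's own statement) =====
-- stated objective: simpler
-- what changed: Replaces A's five separate keyword-set intersections tried in cascade by one precomputed keyword-to-theme dictionary, a single lookup pass over the lowercased keywords collecting the themes hit, and a scan of a fixed priority list; the mood fallback becomes a dict lookup with default.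
import Mathlib
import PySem

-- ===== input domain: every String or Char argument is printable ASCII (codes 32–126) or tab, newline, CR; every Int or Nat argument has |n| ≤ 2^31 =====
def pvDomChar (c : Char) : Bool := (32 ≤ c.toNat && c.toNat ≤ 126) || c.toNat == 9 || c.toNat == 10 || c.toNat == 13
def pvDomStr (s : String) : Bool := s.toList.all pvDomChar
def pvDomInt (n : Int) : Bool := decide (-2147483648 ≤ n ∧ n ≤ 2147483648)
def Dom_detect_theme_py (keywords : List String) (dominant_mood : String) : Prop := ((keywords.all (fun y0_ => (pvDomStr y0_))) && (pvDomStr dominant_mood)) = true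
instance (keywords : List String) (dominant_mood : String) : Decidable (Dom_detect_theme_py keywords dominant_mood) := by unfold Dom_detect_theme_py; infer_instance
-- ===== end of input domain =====

-- B replaces A's five set intersections by one keyword→theme dictionary, a single lookup pass
-- over the keywords and a priority scan (objective: simpler).

-- ===== PORT A =====
def work_keywords : PySem.Set String := PySem.Set.ofList ["work", "office", "meeting", "project", "colleague", "boss", "job"]
def travel_keywords : PySem.Set String := PySem.Set.ofList ["travel", "trip", "vacation", "flight", "hotel", "visit", "tourist"]
def family_keywords : PySem.Set String := PySem.Set.ofList ["family", "mom", "dad", "sister", "brother", "parent", "child"]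
def friends_keywords : PySem.Set String := PySem.Set.ofList ["friend", "buddy", "pal", "hangout", "party", "fun"]
def health_keywords : PySem.Set String := PySem.Set.ofList ["health", "exercise", "gym", "doctor", "medical", "fitness", "wellness"]

def detect_theme_py (keywords : List String) (dominant_mood : String) : String :=
  let keyword_set : PySem.Set String := PySem.Set.ofList (keywords.map PySem.Str.lower)
  if PySem.Set.inter keyword_set work_keywords ≠ [] then "Work"
  else if PySem.Set.inter keyword_set travel_keywords ≠ [] then "Travel"
  else if PySem.Set.inter keyword_set family_keywords ≠ [] then "Family"
  else if PySem.Set.inter keyword_set friends_keywords ≠ [] then "Friends"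
  else if PySem.Set.inter keyword_set health_keywords ≠ [] then "Health"
  else if dominant_mood = "Happy" then "Joy"
  else if dominant_mood = "Sad" then "Reflection"
  else "Life"

-- ===== PORT B =====
def themeOf : PySem.Dict String String := PySem.Dict.ofList
  [("work", "Work"), ("office", "Work"), ("meeting", "Work"), ("project", "Work"),
   ("colleague", "Work"), ("boss", "Work"), ("job", "Work"),
   ("travel", "Travel"), ("trip", "Travel"), ("vacation", "Travel"), ("flight", "Travel"),
   ("hotel", "Travel"), ("visit", "Travel"), ("tourist", "Travel"),
   ("family", "Family"), ("mom", "Family"), ("dad", "Family"), ("sister", "Family"),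
   ("brother", "Family"), ("parent", "Family"), ("child", "Family"),
   ("friend", "Friends"), ("buddy", "Friends"), ("pal", "Friends"), ("hangout", "Friends"),
   ("party", "Friends"), ("fun", "Friends"),
   ("health", "Health"), ("exercise", "Health"), ("gym", "Health"), ("doctor", "Health"),
   ("medical", "Health"), ("fitness", "Health"), ("wellness", "Health")]

def priorityList : List String := ["Work", "Travel", "Family", "Friends", "Health"]

def moodFallback : PySem.Dict String String := PySem.Dict.ofList [("Happy", "Joy"), ("Sad", "Reflection")]

def detect_theme_py_alt (keywords : List String) (dominant_mood : String) : String :=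
  let hit : PySem.Set String := keywords.foldl
    (fun s k =>
      match themeOf.get? (PySem.Str.lower k) with
      | some t => PySem.Set.add s t
      | none => s)
    PySem.Set.empty
  match priorityList.find? (fun t => PySem.Set.contains hit t) with
  | some t => t
  | none => moodFallback.getD dominant_mood "Life"

-- ===== PRECONDITION & SPEC =====
def Spec_detect_theme_py (keywords : List String) (dominant_mood : String) (out : String) : Prop := out = detect_theme_py_alt keywords dominant_mood
instance (keywords : List String) (dominant_mood : String) (out : String) : Decidable (Spec_detect_theme_py keywords dominant_mood out) := by unfold Spec_detect_theme_py; infer_instance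

-- ===== CLAIM (what is proved, stated in full; the proofs are below) =====
def Claim_equal_detect_theme_py : Prop := ∀ (keywords : List String) (dominant_mood : String), Dom_detect_theme_py keywords dominant_mood → Spec_detect_theme_py keywords dominant_mood (detect_theme_py keywords dominant_mood)

-- ===== LEMMAS AND PROOFS =====

-- A's test "keyword_set ∩ cat is nonempty" means: some keyword lowercases into cat.
lemma inter_ne_nil_iff (kws : List String) (cat : List String) :
    (PySem.Set.inter (PySem.Set.ofList (kws.map PySem.Str.lower)) cat ≠ []) ↔
      ∃ k ∈ kws, PySem.Str.lower k ∈ cat := by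
  rw [Ne, List.eq_nil_iff_forall_not_mem]
  push Not
  constructor
  · rintro ⟨y, hy⟩
    rw [PySem.Set.mem_inter, PySem.Set.mem_ofList, List.mem_map] at hy
    obtain ⟨⟨k, hk, rfl⟩, hc⟩ := hy
    exact ⟨k, hk, hc⟩
  · rintro ⟨k, hk, hc⟩
    exact ⟨PySem.Str.lower k, by
      rw [PySem.Set.mem_inter, PySem.Set.mem_ofList, List.mem_map]
      exact ⟨⟨k, hk, rfl⟩, hc⟩⟩

-- membership in B's accumulated hit set
lemma mem_hit (kws : List String) (s : PySem.Set String) (t : String) :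
    t ∈ kws.foldl
      (fun s k =>
        match themeOf.get? (PySem.Str.lower k) with
        | some t => PySem.Set.add s t
        | none => s) s ↔
      t ∈ s ∨ ∃ k ∈ kws, themeOf.get? (PySem.Str.lower k) = some t := by
  induction kws generalizing s with
  | nil => simp
  | cons k rest ih =>
    simp only [List.foldl_cons, List.mem_cons]
    cases h : themeOf.get? (PySem.Str.lower k) with
    | none =>
      rw [ih]
      constructor
      · rintro (hs | ⟨k', hk', hg⟩)
        · exact Or.inl hs
        · exact Or.inr ⟨k', Or.inr hk', hg⟩
      · rintro (hs | ⟨k', hk' | hk', hg⟩)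
        · exact Or.inl hs
        · subst hk'; rw [h] at hg; cases hg
        · exact Or.inr ⟨k', hk', hg⟩
    | some u =>
      rw [ih, PySem.Set.mem_add]
      constructor
      · rintro ((hs | rfl) | ⟨k', hk', hg⟩)
        · exact Or.inl hs
        · exact Or.inr ⟨k, Or.inl rfl, h⟩
        · exact Or.inr ⟨k', Or.inr hk', hg⟩
      · rintro (hs | ⟨k', hk' | hk', hg⟩)
        · exact Or.inl (Or.inl hs)
        · subst hk'; rw [h] at hg; exact Or.inl (Or.inr (Option.some_injective _ hg).symm)
        · exact Or.inr ⟨k', hk', hg⟩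

-- the dictionary lookup, characterised by the five categories
lemma themeOf_eq : themeOf = PySem.Dict.mk
    [("work", "Work"), ("office", "Work"), ("meeting", "Work"), ("project", "Work"),
     ("colleague", "Work"), ("boss", "Work"), ("job", "Work"),
     ("travel", "Travel"), ("trip", "Travel"), ("vacation", "Travel"), ("flight", "Travel"),
     ("hotel", "Travel"), ("visit", "Travel"), ("tourist", "Travel"),
     ("family", "Family"), ("mom", "Family"), ("dad", "Family"), ("sister", "Family"),
     ("brother", "Family"), ("parent", "Family"), ("child", "Family"),
     ("friend", "Friends"), ("buddy", "Friends"), ("pal", "Friends"), ("hangout", "Friends"),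
     ("party", "Friends"), ("fun", "Friends"),
     ("health", "Health"), ("exercise", "Health"), ("gym", "Health"), ("doctor", "Health"),
     ("medical", "Health"), ("fitness", "Health"), ("wellness", "Health")] := by rfl

set_option maxRecDepth 40000 in
lemma themeOf_keys_nodup : themeOf.keys.Nodup := by
  rw [themeOf_eq]; decide

lemma lookup_work (w : String) : themeOf.get? w = some "Work" ↔ w ∈ work_keywords := by
  rw [PySem.Dict.get?_eq_some_iff_mem_items themeOf w "Work" themeOf_keys_nodup, themeOf_eq]
  simp [work_keywords, PySem.Set.mem_ofList, Prod.mk.injEq]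

lemma lookup_travel (w : String) : themeOf.get? w = some "Travel" ↔ w ∈ travel_keywords := by
  rw [PySem.Dict.get?_eq_some_iff_mem_items themeOf w "Travel" themeOf_keys_nodup, themeOf_eq]
  simp [travel_keywords, PySem.Set.mem_ofList, Prod.mk.injEq]

lemma lookup_family (w : String) : themeOf.get? w = some "Family" ↔ w ∈ family_keywords := by
  rw [PySem.Dict.get?_eq_some_iff_mem_items themeOf w "Family" themeOf_keys_nodup, themeOf_eq]
  simp [family_keywords, PySem.Set.mem_ofList, Prod.mk.injEq]

lemma lookup_friends (w : String) : themeOf.get? w = some "Friends" ↔ w ∈ friends_keywords := by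
  rw [PySem.Dict.get?_eq_some_iff_mem_items themeOf w "Friends" themeOf_keys_nodup, themeOf_eq]
  simp [friends_keywords, PySem.Set.mem_ofList, Prod.mk.injEq]

lemma lookup_health (w : String) : themeOf.get? w = some "Health" ↔ w ∈ health_keywords := by
  rw [PySem.Dict.get?_eq_some_iff_mem_items themeOf w "Health" themeOf_keys_nodup, themeOf_eq]
  simp [health_keywords, PySem.Set.mem_ofList, Prod.mk.injEq]

lemma inter_iff_mem_hit (kws : List String) (cat : List String) (t : String)
    (hl : ∀ w, themeOf.get? w = some t ↔ w ∈ cat) :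
    (PySem.Set.inter (PySem.Set.ofList (kws.map PySem.Str.lower)) cat ≠ []) ↔
      t ∈ (kws.foldl
      (fun s k => match themeOf.get? (PySem.Str.lower k) with
        | some t => PySem.Set.add s t
        | none => s) PySem.Set.empty) := by
  rw [inter_ne_nil_iff, mem_hit]
  simp [PySem.Set.empty, hl]

lemma find_five (hit : List String) :
    List.find? (fun t => PySem.Set.contains hit t) priorityList =
      if "Work" ∈ hit then some "Work"
      else if "Travel" ∈ hit then some "Travel"
      else if "Family" ∈ hit then some "Family"
      else if "Friends" ∈ hit then some "Friends"
      else if "Health" ∈ hit then some "Health"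
      else none := by
  simp only [priorityList]
  by_cases r1 : "Work" ∈ hit
  · rw [List.find?_cons_of_pos (by simpa [PySem.Set.contains_iff] using r1), if_pos r1]
  · rw [List.find?_cons_of_neg (by simp [r1]), if_neg r1]
    by_cases r2 : "Travel" ∈ hit
    · rw [List.find?_cons_of_pos (by simpa [PySem.Set.contains_iff] using r2), if_pos r2]
    · rw [List.find?_cons_of_neg (by simp [r2]), if_neg r2]
      by_cases r3 : "Family" ∈ hit
      · rw [List.find?_cons_of_pos (by simpa [PySem.Set.contains_iff] using r3), if_pos r3]
      · rw [List.find?_cons_of_neg (by simp [r3]), if_neg r3]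
        by_cases r4 : "Friends" ∈ hit
        · rw [List.find?_cons_of_pos (by simpa [PySem.Set.contains_iff] using r4), if_pos r4]
        · rw [List.find?_cons_of_neg (by simp [r4]), if_neg r4]
          by_cases r5 : "Health" ∈ hit
          · rw [List.find?_cons_of_pos (by simpa [PySem.Set.contains_iff] using r5), if_pos r5]
          · rw [List.find?_cons_of_neg (by simp [r5]), if_neg r5,
              List.find?_nil]

set_option maxHeartbeats 4000000 in
set_option maxRecDepth 10000 in
theorem detect_theme_py_spec : Claim_equal_detect_theme_py := by
  intro kws m _
  unfold Spec_detect_theme_py detect_theme_py detect_theme_py_alt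
  have hfall : moodFallback.getD m "Life" =
      if m = "Happy" then "Joy" else if m = "Sad" then "Reflection" else "Life" := by
    have hmf : moodFallback = PySem.Dict.mk [("Happy", "Joy"), ("Sad", "Reflection")] := by rfl
    rw [hmf, PySem.Dict.getD_eq_get?_getD]
    simp only [PySem.Dict.get?_mk_cons, beq_iff_eq]
    by_cases h1 : m = "Happy"
    · subst h1; simp
    · by_cases h2 : m = "Sad"
      · subst h2; simp
      · rw [if_neg (fun h => h1 h.symm), if_neg (fun h => h2 h.symm), if_neg h1, if_neg h2]
        rfl
  have hW := inter_iff_mem_hit kws work_keywords "Work" lookup_work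
  have hT := inter_iff_mem_hit kws travel_keywords "Travel" lookup_travel
  have hF := inter_iff_mem_hit kws family_keywords "Family" lookup_family
  have hR := inter_iff_mem_hit kws friends_keywords "Friends" lookup_friends
  have hH := inter_iff_mem_hit kws health_keywords "Health" lookup_health
  simp only [hW, hT, hF, hR, hH, find_five]
  clear hW hT hF hR hH
  by_cases q1 : "Work" ∈ (kws.foldl
      (fun s k => match themeOf.get? (PySem.Str.lower k) with
        | some t => PySem.Set.add s t
        | none => s) PySem.Set.empty)
  · rw [if_pos q1, if_pos q1]
  · rw [if_neg q1, if_neg q1]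
    by_cases q2 : "Travel" ∈ (kws.foldl
      (fun s k => match themeOf.get? (PySem.Str.lower k) with
        | some t => PySem.Set.add s t
        | none => s) PySem.Set.empty)
    · rw [if_pos q2, if_pos q2]
    · rw [if_neg q2, if_neg q2]
      by_cases q3 : "Family" ∈ (kws.foldl
      (fun s k => match themeOf.get? (PySem.Str.lower k) with
        | some t => PySem.Set.add s t
        | none => s) PySem.Set.empty)
      · rw [if_pos q3, if_pos q3]
      · rw [if_neg q3, if_neg q3]
        by_cases q4 : "Friends" ∈ (kws.foldl
      (fun s k => match themeOf.get? (PySem.Str.lower k) with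
        | some t => PySem.Set.add s t
        | none => s) PySem.Set.empty)
        · rw [if_pos q4, if_pos q4]
        · rw [if_neg q4, if_neg q4]
          by_cases q5 : "Health" ∈ (kws.foldl
      (fun s k => match themeOf.get? (PySem.Str.lower k) with
        | some t => PySem.Set.add s t
        | none => s) PySem.Set.empty)
          · rw [if_pos q5, if_pos q5]
          · rw [if_neg q5, if_neg q5, hfall]
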